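-- pv_equiv track=rewrite | github.com/jwatzman/aoc | 2023/5/5.py | read_one_map
-- ===== SOURCE A (Python) =====
-- def read_one_map(lines):
-- 	m = []
-- 	lines.pop(0)
-- 	while len(lines) > 0:
-- 		line = lines.pop(0).strip()
-- 		if (line == ""):
-- 			break
-- 		m.append(list(map(int, line.split(" "))))
-- 	return m
-- ===== SOURCE B (Python) =====
-- def read_one_map(lines):
--     lines.pop(0)
--     boundary = next((i for i, l in enumerate(lines) if l.strip() == ""), len(lines))
--     m = [list(map(int, l.strip().split(" "))) for l in lines[:boundary]]
--     del lines[:boundary + 1]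
--     return m
-- ===== Notes on version B (the rewrite author's own statement) =====
-- stated objective: simpler
-- what changed: Replaces the interleaved pop-and-parse while loop with a locate-first-blank-boundary search, a comprehension parsing the slice before it, and one bulk del that performs the same mutation of the caller's list.
import Mathlib
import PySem

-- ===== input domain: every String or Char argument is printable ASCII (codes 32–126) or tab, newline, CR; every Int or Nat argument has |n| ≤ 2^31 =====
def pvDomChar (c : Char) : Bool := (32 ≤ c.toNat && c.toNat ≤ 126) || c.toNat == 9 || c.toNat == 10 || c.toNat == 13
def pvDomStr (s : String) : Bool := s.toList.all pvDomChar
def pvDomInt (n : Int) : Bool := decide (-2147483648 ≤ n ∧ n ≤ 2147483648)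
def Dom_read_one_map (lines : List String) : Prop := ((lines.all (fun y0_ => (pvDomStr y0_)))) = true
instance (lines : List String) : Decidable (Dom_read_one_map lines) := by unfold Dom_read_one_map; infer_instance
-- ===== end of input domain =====

-- B replaces A's interleaved pop-and-parse loop by a locate-boundary / parse-slice / bulk-delete
-- decomposition (objective: simpler). Both Pythons mutate `lines` identically; the theorems here
-- are about the RETURN value only.

-- ===== PORT A =====
-- parse one already-stripped line: list(map(int, line.split(" "))); split? is some (sep ≠ ""),
-- and Pre_ guarantees every int() succeeds, so neither .getD default is reached on admitted inputs
def pvParse (line : String) : List Int :=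
  (((PySem.Str.split? line " ").getD [])).map (fun t => (PySem.Int.ofStr? t).getD 0)

-- the while loop: pop the next line, stop on blank, else parse and continue
def pvLoopA : List String → List (List Int)
  | [] => []
  | l :: rest =>
    let line := PySem.Str.strip l
    if line = "" then []
    else pvParse line :: pvLoopA rest

-- lines.pop(0) discards the first line (Pre_ requires lines ≠ []), then the loop runs on the rest
def read_one_map (lines : List String) : List (List Int) :=
  pvLoopA lines.tail

-- ===== PORT B =====
-- boundary = index of first blank line (default: all of them), then parse the slice before it
def read_one_map_alt (lines : List String) : List (List Int) :=
  let rest := lines.tail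
  let boundary := (rest.findIdx? (fun l => PySem.Str.strip l == "")).getD rest.length
  (rest.take boundary).map (fun l => pvParse (PySem.Str.strip l))

-- ===== PRECONDITION & SPEC =====
-- Pre_ excludes exactly the inputs where A raises: the empty list (pop(0) → IndexError) and
-- inputs whose parsed prefix contains a token int() rejects (ValueError); B raises there too.
def Pre_read_one_map (lines : List String) : Prop :=
  lines ≠ [] ∧
  ∀ l ∈ lines.tail.takeWhile (fun l => !(PySem.Str.strip l == "")),
    ∀ t ∈ ((PySem.Str.split? (PySem.Str.strip l) " ").getD []), (PySem.Int.ofStr? t).isSome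
instance (lines : List String) : Decidable (Pre_read_one_map lines) := by
  unfold Pre_read_one_map; infer_instance

def pvWitness_read_one_map : List String := ["seeds:", "1 2", " 30 -4 ", "", "ignored"]

def Spec_read_one_map (lines : List String) (out : List (List Int)) : Prop := out = read_one_map_alt lines
instance (lines : List String) (out : List (List Int)) : Decidable (Spec_read_one_map lines out) := by unfold Spec_read_one_map; infer_instance

-- ===== CLAIM (what is proved, stated in full; the proofs are below) =====
def Claim_equal_read_one_map : Prop := ∀ (lines : List String), Dom_read_one_map lines → Pre_read_one_map lines → Spec_read_one_map lines (read_one_map lines)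

-- ===== LEMMAS AND PROOFS =====
-- A's loop over any list equals B's take-to-first-blank-then-map (holds unconditionally)
theorem pvLoopA_eq (rest : List String) :
    pvLoopA rest =
      (rest.take ((rest.findIdx? (fun l => PySem.Str.strip l == "")).getD rest.length)).map
        (fun l => pvParse (PySem.Str.strip l)) := by
  induction rest with
  | nil => rfl
  | cons l rest ih =>
    rw [List.findIdx?_cons]
    by_cases h : PySem.Str.strip l = ""
    · simp [pvLoopA, h]
    · have hb : (PySem.Str.strip l == "") = false := by simpa using h
      simp only [hb]
      cases hf : rest.findIdx? (fun l => PySem.Str.strip l == "") with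
      | none => simp [pvLoopA, h, ih, hf]
      | some i => simp [pvLoopA, h, ih, hf]

-- ===== VERDICT (by name: the statement is the Claim_ definition above) =====
theorem read_one_map_spec : Claim_equal_read_one_map := by
  intro lines _ _
  unfold Spec_read_one_map read_one_map read_one_map_alt
  exact pvLoopA_eq lines.tail
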